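-- pv_equiv track=rewrite | github.com/2018007956/Algorithm | programmers/고득점 Kit/해시/42577.py | solution
-- ===== SOURCE A (Python) =====
-- def solution(phone_book):
--     shortest_len = len(sorted(phone_book, key=len)[0])
--
--     new_phone_book = []
--     for x in phone_book:
--         new_phone_book.append(x[:shortest_len])
--
--     if len(set(new_phone_book))==len(phone_book):
--         return True
--     else:
--         return False
-- ===== SOURCE B (Python) =====
-- def solution(phone_book):
--     shortest_len = len(sorted(phone_book, key=len)[0])
--     t = sorted(x[:shortest_len] for x in phone_book)
--     return all(a != b for a, b in zip(t, t[1:]))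
-- ===== Notes on version B (the rewrite author's own statement) =====
-- stated objective: alternative
-- what changed: Replaces the set-cardinality distinctness test (build all truncations, compare len(set(...)) with len(phone_book)) by sorting the truncated strings and scanning adjacent pairs for an equal neighbour.
import Mathlib
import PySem

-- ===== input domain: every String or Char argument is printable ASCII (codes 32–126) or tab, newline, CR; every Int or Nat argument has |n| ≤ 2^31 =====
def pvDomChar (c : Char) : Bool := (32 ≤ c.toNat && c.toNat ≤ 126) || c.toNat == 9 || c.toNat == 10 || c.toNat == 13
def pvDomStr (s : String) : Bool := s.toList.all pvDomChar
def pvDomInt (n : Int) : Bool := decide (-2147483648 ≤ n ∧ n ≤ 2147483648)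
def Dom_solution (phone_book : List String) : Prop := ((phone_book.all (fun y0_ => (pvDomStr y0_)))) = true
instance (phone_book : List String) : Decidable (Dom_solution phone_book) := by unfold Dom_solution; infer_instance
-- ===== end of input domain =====

-- B replaces A's set-cardinality distinctness test by sort-then-adjacent-scan duplicate detection (alternative decomposition, same asymptotic cost).


-- ===== PORT A =====
def solution (phone_book : List String) : Bool :=
  let shortest_len : Int :=
    PySem.Str.len (PySem.List.pyGetD (PySem.List.sorted phone_book (fun x => PySem.Str.len x)) 0 "")
  let new_phone_book :=
    phone_book.foldl (fun acc x => acc ++ [PySem.Str.slice x none (some shortest_len)]) []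
  if PySem.Set.len (PySem.Set.ofList new_phone_book) = (phone_book.length : Int) then true else false

-- ===== PORT B =====
def solution_alt (phone_book : List String) : Bool :=
  let shortest_len : Int :=
    PySem.Str.len (PySem.List.pyGetD (PySem.List.sorted phone_book (fun x => PySem.Str.len x)) 0 "")
  let t := PySem.List.sorted (phone_book.map (fun x => PySem.Str.slice x none (some shortest_len)))
             (fun s => s)
  (t.zip (PySem.List.slice t (some 1) none)).all (fun p => p.1 != p.2)

-- ===== PRECONDITION & SPEC =====
-- Pre_ excludes only the empty list, on which A raises IndexError at sorted(phone_book, key=len)[0] (B raises there too).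
def Pre_solution (phone_book : List String) : Prop := phone_book ≠ []
instance (phone_book : List String) : Decidable (Pre_solution phone_book) := by unfold Pre_solution; infer_instance
def pvWitness_solution : List String := (["119", "97674223", "1195524421"])

def Spec_solution (phone_book : List String) (out : Bool) : Prop := out = solution_alt phone_book
instance (phone_book : List String) (out : Bool) : Decidable (Spec_solution phone_book out) := by unfold Spec_solution; infer_instance

-- ===== CLAIM (what is proved, stated in full; the proofs are below) =====
def Claim_equal_solution : Prop := ∀ (phone_book : List String), Dom_solution phone_book → Pre_solution phone_book → Spec_solution phone_book (solution phone_book)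

-- ===== LEMMAS AND PROOFS =====

-- set(xs) (kept in first-occurrence order) is a sublist of xs: generalized over the foldl accumulator
theorem ofList_foldl_sublist {α : Type} [BEq α] (xs acc : List α) :
    ∃ ys, List.foldl PySem.Set.add acc xs = acc ++ ys ∧ ys.Sublist xs := by
  induction xs generalizing acc with
  | nil => exact ⟨[], by simp⟩
  | cons x xs ih =>
    by_cases h : acc.contains x = true
    · obtain ⟨ys, h1, h2⟩ := ih acc
      refine ⟨ys, ?_, h2.cons x⟩
      show List.foldl PySem.Set.add (PySem.Set.add acc x) xs = acc ++ ys
      rw [show PySem.Set.add acc x = acc by simp [PySem.Set.add, h]]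
      exact h1
    · obtain ⟨ys, h1, h2⟩ := ih (acc ++ [x])
      refine ⟨x :: ys, ?_, h2.cons₂ x⟩
      show List.foldl PySem.Set.add (PySem.Set.add acc x) xs = acc ++ x :: ys
      rw [show PySem.Set.add acc x = acc ++ [x] by simp [PySem.Set.add, h]]
      simpa using h1

-- len(set(xs)) == len(xs) is exactly distinctness of xs (A's test)
theorem length_ofList_eq_iff {α : Type} [BEq α] [LawfulBEq α] (xs : List α) :
    (PySem.Set.ofList xs).length = xs.length ↔ xs.Nodup := by
  constructor
  · intro h
    have hs : PySem.Set.ofList xs = xs := by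
      obtain ⟨ys, h1, h2⟩ := ofList_foldl_sublist xs []
      have hsub : (PySem.Set.ofList xs).Sublist xs := by
        simpa [PySem.Set.ofList, PySem.Set.empty, h1] using h2
      exact hsub.eq_of_length h
    rw [← hs]; exact PySem.Set.nodup_ofList xs
  · intro h; rw [PySem.Set.ofList_eq_self_of_nodup xs h]

-- on a ≤-sorted list, "no adjacent pair is equal" is exactly distinctness (B's test)
theorem adj_scan_iff_nodup (t : List String) (hp : t.Pairwise (· ≤ ·)) :
    ((t.zip t.tail).all (fun p => p.1 != p.2) = true) ↔ t.Nodup := by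
  induction t with
  | nil => simp
  | cons a t ih =>
    cases t with
    | nil => simp
    | cons b r =>
      have hab : a ≤ b := (List.pairwise_cons.mp hp).1 b (by simp)
      have hbr : ∀ x ∈ r, b ≤ x := fun x hx =>
        (List.pairwise_cons.mp (List.pairwise_cons.mp hp).2).1 x hx
      have ih' := ih (List.pairwise_cons.mp hp).2
      simp only [List.tail_cons, List.zip_cons_cons, List.all_cons, Bool.and_eq_true, bne_iff_ne,
        ne_eq, List.nodup_cons, List.mem_cons] at ih' ⊢
      rw [ih']
      constructor
      · rintro ⟨hne, hnr, hr⟩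
        refine ⟨fun hm => ?_, hnr, hr⟩
        rcases hm with h | h
        · exact hne h
        · exact hne (le_antisymm hab (hbr a h))
      · rintro ⟨hnm, hnr, hr⟩
        exact ⟨fun h => hnm (Or.inl h), hnr, hr⟩

-- the two tests agree on the truncated list m (n is len(phone_book), which equals len(m))
theorem solution_core (m : List String) (n : Int) (hn : n = (m.length : Int)) :
    (if PySem.Set.len (PySem.Set.ofList m) = n then true else false)
      = ((PySem.List.sorted m (fun s => s)).zip ((PySem.List.sorted m (fun s => s)).tail)).all
          (fun p => p.1 != p.2) := by
  have hper := PySem.List.sorted_perm m (fun s => s) false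
  have hA : (PySem.Set.len (PySem.Set.ofList m) = n) ↔ m.Nodup := by
    rw [hn, show PySem.Set.len (PySem.Set.ofList m) = ((PySem.Set.ofList m).length : Int) from rfl,
      Int.natCast_inj]
    exact length_ofList_eq_iff m
  have hB := adj_scan_iff_nodup (PySem.List.sorted m (fun s => s))
    (PySem.List.sorted_pairwise m (fun s => s))
  rw [hper.nodup_iff] at hB
  rw [Bool.eq_iff_iff]
  constructor
  · intro h; split_ifs at h with hc
    exact hB.mpr (hA.mp hc)
  · intro h; rw [if_pos (hA.mpr (hB.mp h))]

-- ===== VERDICT (by name: the statement is the Claim_ definition above) =====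
theorem solution_spec : Claim_equal_solution := by
  intro phone_book _ _
  unfold Spec_solution solution solution_alt
  simp only [PySem.List.foldl_append_singleton_eq_map, List.nil_append, PySem.List.slice_from_one]
  rw [solution_core _ _ (by simp)]
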